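-- pv_equiv track=rewrite | github.com/Revi1337/BaekJoon-Coding-Test | 백준/Silver/9536. 여우는 어떻게 울지？/여우는 어떻게 울지？.py | solution
-- ===== SOURCE A (Python) =====
-- def solution(sounds, strings):
--     book = set()
--     for string in strings:
--         for sound in string:
--             book.add(sound)
--     answer = []
--     for sound in sounds:
--         if sound not in book:
--             answer.append(sound)
--     return " ".join(answer)
-- ===== SOURCE B (Python) =====
-- def solution(sounds, strings):
--     # simpler: no precomputed set; scan the strings directly for each sound
--     return " ".join(s for s in sounds
--                     if not any(ch == s for string in strings for ch in string))
-- ===== Notes on version B (the rewrite author's own statement) =====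
-- stated objective: simpler
-- what changed: Drops the precomputed set: each sound is kept iff a direct scan of the strings finds no equal element, expressed as one filter/join comprehension.
import Mathlib
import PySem

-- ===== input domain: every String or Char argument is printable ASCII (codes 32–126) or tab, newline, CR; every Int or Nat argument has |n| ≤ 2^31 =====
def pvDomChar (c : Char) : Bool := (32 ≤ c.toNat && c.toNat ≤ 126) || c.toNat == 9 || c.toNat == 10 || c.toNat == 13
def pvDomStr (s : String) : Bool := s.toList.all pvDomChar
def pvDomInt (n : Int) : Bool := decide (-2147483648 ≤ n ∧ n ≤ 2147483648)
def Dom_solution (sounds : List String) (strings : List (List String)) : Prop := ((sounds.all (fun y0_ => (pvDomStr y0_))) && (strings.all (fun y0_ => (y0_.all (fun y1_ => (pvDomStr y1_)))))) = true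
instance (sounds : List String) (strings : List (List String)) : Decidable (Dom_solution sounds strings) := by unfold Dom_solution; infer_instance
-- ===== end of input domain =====

-- ===== PORT A =====
def solution (sounds : List String) (strings : List (List String)) : String :=
  let book : PySem.Set String :=
    strings.foldl (fun b string => string.foldl (fun b sound => PySem.Set.add b sound) b) PySem.Set.empty
  let answer : List String :=
    sounds.foldl (fun acc sound => if PySem.Set.contains book sound then acc else acc ++ [sound]) []
  PySem.Str.join " " answer

-- ===== PORT B =====
def solution_alt (sounds : List String) (strings : List (List String)) : String :=
  PySem.Str.join " "
    (sounds.filter (fun s => !(strings.any (fun string => string.any (fun ch => ch == s)))))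

-- ===== PRECONDITION & SPEC =====
def Spec_solution (sounds : List String) (strings : List (List String)) (out : String) : Prop := out = solution_alt sounds strings
instance (sounds : List String) (strings : List (List String)) (out : String) : Decidable (Spec_solution sounds strings out) := by unfold Spec_solution; infer_instance

-- ===== CLAIM (what is proved, stated in full; the proofs are below) =====
def Claim_equal_solution : Prop := ∀ (sounds : List String) (strings : List (List String)), Dom_solution sounds strings → Spec_solution sounds strings (solution sounds strings)

-- ===== LEMMAS AND PROOFS =====

-- ===== VERDICT (by name: the statement is the Claim_ definition above) =====
-- membership in the folded-up set = a direct scan of the strings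
theorem contains_foldl_add (xs : List String) (b : PySem.Set String) (x : String) :
    PySem.Set.contains (xs.foldl (fun b s => PySem.Set.add b s) b) x
      = (PySem.Set.contains b x || xs.any (fun ch => ch == x)) := by
  induction xs generalizing b with
  | nil => simp
  | cons h t ih =>
    simp only [List.foldl_cons, List.any_cons]
    rw [ih]
    by_cases hx : x = h
    · subst hx
      simp only [PySem.Set.add, PySem.Set.contains]
      split_ifs <;> simp_all
    · have hbe : (h == x) = false := beq_eq_false_iff_ne.mpr (fun e => hx e.symm)
      simp only [PySem.Set.add, hbe, Bool.false_or]
      split_ifs <;> simp_all [PySem.Set.contains]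

theorem contains_book (strings : List (List String)) (b : PySem.Set String) (x : String) :
    PySem.Set.contains (strings.foldl (fun b string => string.foldl (fun b s => PySem.Set.add b s) b) b) x
      = (PySem.Set.contains b x || strings.any (fun string => string.any (fun ch => ch == x))) := by
  induction strings generalizing b with
  | nil => simp
  | cons h t ih =>
    simp only [List.foldl_cons, List.any_cons]
    rw [ih, contains_foldl_add, Bool.or_assoc]

theorem if_swap_append (c : Bool) (acc : List String) (x : String) :
    (if c = true then acc else acc ++ [x]) = (if (!c) = true then acc ++ [x] else acc) := by
  cases c <;> simp

theorem solution_spec : Claim_equal_solution := by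
  intro sounds strings _
  unfold Spec_solution solution solution_alt
  simp only [contains_book, if_swap_append]
  rw [PySem.List.foldl_append_if_eq_filter]
  simp [PySem.Set.contains]
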